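-- pv_equiv track=rewrite | github.com/louismaillet/BUT1 | semestre1/init_system_2/TP9/TP9 Ensembles et dictionnaires-20241119/3_mqrf/mqrf.py | quel_guichet_v3
-- ===== SOURCE A (Python) =====
-- def quel_guichet_v3(mqrf, guichet):
--     """Détermine le nom du guichet qui délivre le formulaire A-38
--     ainsi que le nombre de guichets visités
--
--     Args:
--         mqrf (dict): représente une maison qui rend fou
--         guichet (str): le nom du guichet de départ qui est le nom d'un guichet de la mqrf
--
--     Returns:
--         tuple: le nom du guichet qui finit par donner le formulaire A-38 et le nombre de
--         guichets visités pour y parvenir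
--         S'il n'est pas possible d'obtenir le formulaire en partant du guichet de depart,
--         cette fonction renvoie None
--     """
--     guichet_final = mqrf[guichet]
--     nb_visite = 1
--     while guichet_final != None:
--         guichet = guichet_final
--         guichet_final = mqrf[guichet]
--         nb_visite += 1
--         if nb_visite > len(mqrf):
--             return None
--     return guichet, nb_visite
-- ===== SOURCE B (Python) =====
-- def quel_guichet_v3(mqrf, guichet):
--     """Floyd tortoise-and-hare: detect a cycle with two pointers (no counter,
--     no bound from len(mqrf)); if no cycle, walk the chain once and count."""
--     tort = hare = guichet
--     while True:
--         hare = mqrf[hare]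
--         if hare is None:
--             break
--         hare = mqrf[hare]
--         if hare is None:
--             break
--         tort = mqrf[tort]
--         if tort == hare:
--             return None
--     # no cycle: the chain from guichet terminates; walk it once, counting
--     nb = 1
--     cur = guichet
--     while True:
--         nxt = mqrf[cur]
--         if nxt is None:
--             return cur, nb
--         cur = nxt
--         nb += 1
-- ===== Notes on version B (the rewrite author's own statement) =====
-- stated objective: alternative
-- what changed: B uses Floyd's tortoise-and-hare two-pointer cycle detection (return None when the pointers meet) followed, when no cycle exists, by a single counting walk to the endpoint; A chases the pointer once with a visit counter cut off at len(mqrf).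
import Mathlib
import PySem

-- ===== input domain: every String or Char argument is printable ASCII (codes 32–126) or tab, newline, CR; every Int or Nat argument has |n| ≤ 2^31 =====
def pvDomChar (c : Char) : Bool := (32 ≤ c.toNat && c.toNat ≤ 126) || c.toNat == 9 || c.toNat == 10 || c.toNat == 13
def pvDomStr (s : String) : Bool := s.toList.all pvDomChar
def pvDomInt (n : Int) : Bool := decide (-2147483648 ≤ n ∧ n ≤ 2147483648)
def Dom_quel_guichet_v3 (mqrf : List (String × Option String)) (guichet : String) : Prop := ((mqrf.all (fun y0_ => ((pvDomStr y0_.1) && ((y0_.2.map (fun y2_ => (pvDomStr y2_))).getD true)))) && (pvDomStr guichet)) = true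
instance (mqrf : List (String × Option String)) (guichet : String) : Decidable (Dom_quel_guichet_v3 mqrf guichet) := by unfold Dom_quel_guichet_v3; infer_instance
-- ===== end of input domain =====

-- B replaces A's counter-bounded pointer chase by Floyd's two-pointer cycle detection plus one counting walk; same return values.


-- shared dict primitive: mqrf[k] (none = KeyError, excluded by Pre_)
def pvLook (mqrf : List (String × Option String)) (k : String) : Option (Option String) :=
  PySem.Dict.get? (PySem.Dict.mk mqrf) k

-- ===== PORT A =====
-- the while-loop; fuel = mqrf.length: the `nb > len(mqrf)` guard fires no later than fuel exhaustion
def qgA_loop (mqrf : List (String × Option String)) : Nat → String → Option String → Int → Option (String × Int)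
  | _, cur, none, nb => some (cur, nb)
  | 0, _, some _, _ => none
  | fuel+1, _, some g, nb =>
    match pvLook mqrf g with
    | none => none   -- KeyError (outside Pre_)
    | some gf2 =>
      if nb + 1 > (mqrf.length : Int) then none
      else qgA_loop mqrf fuel g gf2 (nb + 1)

def quel_guichet_v3 (mqrf : List (String × Option String)) (guichet : String) : Option (String × Int) :=
  match pvLook mqrf guichet with
  | none => none   -- KeyError (outside Pre_)
  | some gf => qgA_loop mqrf mqrf.length guichet gf 1

-- ===== PORT B =====
-- phase 2: the counting walk (`while True: nxt = mqrf[cur] …`); fuel = len+1 suffices for a terminating chain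
def qgB2 (mqrf : List (String × Option String)) : Nat → String → Int → Option (String × Int)
  | 0, _, _ => none
  | fuel+1, cur, nb =>
    match pvLook mqrf cur with
    | none => none   -- KeyError (outside Pre_)
    | some none => some (cur, nb)
    | some (some nxt) => qgB2 mqrf fuel nxt (nb + 1)

-- phase 1: Floyd's tortoise-and-hare (`while True:` — a meet or a break always occurs in Python;
-- fuel = len+1 is enough for every break, and on fuel exhaustion the chain is cyclic, where Python returns None too)
def qgB1 (mqrf : List (String × Option String)) (g0 : String) : Nat → String → String → Option (String × Int)
  | 0, _, _ => none
  | fuel+1, tort, hare =>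
    match pvLook mqrf hare with
    | none => none   -- KeyError (outside Pre_)
    | some none => qgB2 mqrf (mqrf.length + 1) g0 1   -- break → phase 2
    | some (some h1) =>
      match pvLook mqrf h1 with
      | none => none   -- KeyError (outside Pre_)
      | some none => qgB2 mqrf (mqrf.length + 1) g0 1   -- break → phase 2
      | some (some h2) =>
        match pvLook mqrf tort with
        | none => none   -- KeyError (outside Pre_)
        | some tv =>
          if tv = some h2 then none   -- tortoise and hare met: cycle
          else match tv with
            | some t1 => qgB1 mqrf g0 fuel t1 h2
            | none => none   -- unreachable: the tortoise strictly trails the hare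

def quel_guichet_v3_alt (mqrf : List (String × Option String)) (guichet : String) : Option (String × Int) :=
  qgB1 mqrf guichet (mqrf.length + 1) guichet guichet

-- ===== PRECONDITION & SPEC =====
-- reachable-set closure: one round adds the successor of every node currently in the set
def growOnce (mqrf : List (String × Option String)) (R : List String) : List String :=
  R.foldl (fun acc u =>
    match pvLook mqrf u with
    | some (some v) => if v ∈ acc then acc else acc ++ [v]
    | _ => acc) R

def reachSet (mqrf : List (String × Option String)) (guichet : String) : List String :=
  (growOnce mqrf)^[mqrf.length + 1] [guichet]

-- Pre_ excludes EXACTLY the inputs on which the Python A raises KeyError: following the successor chain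
-- from guichet reaches a node that is not a key of mqrf (stated as a reachable-set closure, all of whose
-- members must be keys); on every other input A returns normally and B matches it. (Both PORTS map a
-- KeyError lookup to none on the same inputs, so the Lean equality below holds without using Pre_;
-- Pre_ is there because the Pythons RAISE on those inputs.)
def Pre_quel_guichet_v3 (mqrf : List (String × Option String)) (guichet : String) : Prop :=
  (reachSet mqrf guichet).all (fun u => (pvLook mqrf u).isSome) = true
instance (mqrf : List (String × Option String)) (guichet : String) : Decidable (Pre_quel_guichet_v3 mqrf guichet) := by unfold Pre_quel_guichet_v3; infer_instance

def pvWitness_quel_guichet_v3 : (List (String × Option String)) × String :=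
  ([("a", some "b"), ("b", none)], "a")

def Spec_quel_guichet_v3 (mqrf : List (String × Option String)) (guichet : String) (out : Option (String × Int)) : Prop := out = quel_guichet_v3_alt mqrf guichet
instance (mqrf : List (String × Option String)) (guichet : String) (out : Option (String × Int)) : Decidable (Spec_quel_guichet_v3 mqrf guichet out) := by unfold Spec_quel_guichet_v3; infer_instance

-- ===== CLAIM (what is proved, stated in full; the proofs are below) =====
def Claim_equal_quel_guichet_v3 : Prop := ∀ (mqrf : List (String × Option String)) (guichet : String), Dom_quel_guichet_v3 mqrf guichet → Pre_quel_guichet_v3 mqrf guichet → Spec_quel_guichet_v3 mqrf guichet (quel_guichet_v3 mqrf guichet)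

-- ===== LEMMAS AND PROOFS =====

-- the abstract successor chain: iterCh n s = the node n steps after s (none once a lookup fails or passes a terminal)
def iterCh (mqrf : List (String × Option String)) : Nat → String → Option String
  | 0, s => some s
  | n+1, s =>
    match pvLook mqrf s with
    | some (some t) => iterCh mqrf n t
    | _ => none

def step1 (mqrf : List (String × Option String)) (x : String) : Option String :=
  match pvLook mqrf x with
  | some (some y) => some y
  | _ => none

theorem iterCh_add (mqrf : List (String × Option String)) (m n : Nat) (s : String) :
    iterCh mqrf (m + n) s = (iterCh mqrf m s).bind (iterCh mqrf n) := by
  induction m generalizing s with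
  | zero => simp [iterCh]
  | succ m ih =>
    have h : m + 1 + n = (m + n) + 1 := by omega
    rw [h]
    cases hpv : pvLook mqrf s with
    | none => simp [iterCh, hpv]
    | some o =>
      cases o with
      | none => simp [iterCh, hpv]
      | some t => simp [iterCh, hpv, ih]

theorem iterCh_one (mqrf : List (String × Option String)) (x : String) :
    iterCh mqrf 1 x = step1 mqrf x := by
  cases hpv : pvLook mqrf x with
  | none => simp [iterCh, step1, hpv]
  | some o => cases o with
    | none => simp [iterCh, step1, hpv]
    | some t => simp [iterCh, step1, hpv]

theorem iterCh_succ_right (mqrf : List (String × Option String)) (n : Nat) (s : String) :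
    iterCh mqrf (n + 1) s = (iterCh mqrf n s).bind (step1 mqrf) := by
  rw [iterCh_add mqrf n 1 s]
  cases iterCh mqrf n s with
  | none => rfl
  | some x => simp [iterCh_one]

theorem iterCh_none_mono (mqrf : List (String × Option String)) {m n : Nat} {s : String}
    (h : iterCh mqrf m s = none) (hmn : m ≤ n) : iterCh mqrf n s = none := by
  have hn : n = m + (n - m) := by omega
  rw [hn, iterCh_add, h]
  rfl

-- a successful lookup's pair is in the list
theorem pvLook_mem {mqrf : List (String × Option String)} {k : String} {v : Option String}
    (h : pvLook mqrf k = some v) : (k, v) ∈ mqrf := by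
  induction mqrf with
  | nil => simp [pvLook, PySem.Dict.get?] at h
  | cons p rest ih =>
    obtain ⟨a, b⟩ := p
    rw [pvLook, PySem.Dict.get?_mk_cons] at h
    by_cases hk : a = k
    · subst hk; simp at h; subst h; exact List.mem_cons_self
    · simp [hk] at h
      exact List.mem_cons_of_mem _ (ih h)

-- a key with a successful lookup is among the dict's keys
theorem pvLook_key {mqrf : List (String × Option String)} {k : String}
    (h : (pvLook mqrf k).isSome = true) : k ∈ mqrf.map Prod.fst := by
  obtain ⟨v, hv⟩ := Option.isSome_iff_exists.mp h
  exact List.mem_map.mpr ⟨(k, v), pvLook_mem hv, rfl⟩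

-- a nodup list of keys is no longer than the dict
theorem keys_card {mqrf : List (String × Option String)} {l : List String}
    (hnd : l.Nodup) (hsub : ∀ v ∈ l, (pvLook mqrf v).isSome = true) :
    l.length ≤ mqrf.length := by
  have h1 : l ⊆ mqrf.map Prod.fst := fun v hv => pvLook_key (hsub v hv)
  have := (List.subperm_of_subset hnd h1).length_le
  simpa using this

-- on a chain that reaches a terminal at k, no strictly earlier node is terminal
theorem chain_no_early_term (mqrf : List (String × Option String)) (g : String) (k : Nat) (xk : String)
    (hxk : iterCh mqrf k g = some xk) :
    ∀ m x, m < k → iterCh mqrf m g = some x → pvLook mqrf x ≠ some none := by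
  intro m x hm hx hterm'
  have h1 : iterCh mqrf (m + 1) g = none := by
    rw [iterCh_succ_right, hx]
    simp [step1, hterm']
  have := iterCh_none_mono mqrf h1 (by omega : m + 1 ≤ k)
  rw [this] at hxk
  simp at hxk

-- before the terminal, each node has a successor
theorem chain_step (mqrf : List (String × Option String)) (g : String) (k : Nat) (xk : String)
    (hxk : iterCh mqrf k g = some xk) :
    ∀ i x, i < k → iterCh mqrf i g = some x →
      ∃ y, pvLook mqrf x = some (some y) ∧ iterCh mqrf (i+1) g = some y := by
  intro i x hi hx
  have hs : iterCh mqrf (i+1) g = step1 mqrf x := by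
    rw [iterCh_succ_right, hx]; rfl
  cases hy : iterCh mqrf (i+1) g with
  | none =>
    have := iterCh_none_mono mqrf hy (by omega : i + 1 ≤ k)
    rw [this] at hxk
    simp at hxk
  | some y =>
    refine ⟨y, ?_, rfl⟩
    rw [hy] at hs
    unfold step1 at hs
    cases hpv : pvLook mqrf x with
    | none => rw [hpv] at hs; simp at hs
    | some o => cases o with
      | none => rw [hpv] at hs; simp at hs
      | some t => rw [hpv] at hs; simp at hs; rw [hs]

-- the chain is injective up to the terminal
theorem chain_inj (mqrf : List (String × Option String)) (g : String) (k : Nat) (xk : String)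
    (hxk : iterCh mqrf k g = some xk) (hterm : pvLook mqrf xk = some none) :
    ∀ i j a, i < j → j ≤ k → iterCh mqrf i g = some a → iterCh mqrf j g = some a → False := by
  intro i j a hij hjk hi hj
  have h2 : iterCh mqrf (k - j) a = some xk := by
    have h := iterCh_add mqrf j (k - j) g
    rw [show j + (k - j) = k from by omega, hxk, hj] at h
    exact h.symm
  have h1 : iterCh mqrf (i + (k - j)) g = some xk := by
    rw [iterCh_add, hi]
    exact h2
  exact chain_no_early_term mqrf g k xk hxk (i + (k - j)) xk (by omega) h1 hterm

-- every chain node up to the terminal is a key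
theorem chain_isSome (mqrf : List (String × Option String)) (g : String) (k : Nat) (xk : String)
    (hxk : iterCh mqrf k g = some xk) (hterm : pvLook mqrf xk = some none) :
    ∀ i x, i ≤ k → iterCh mqrf i g = some x → (pvLook mqrf x).isSome = true := by
  intro i x hi hx
  rcases Nat.lt_or_ge i k with h | h
  · obtain ⟨y, hy, _⟩ := chain_step mqrf g k xk hxk i x h hx
    simp [hy]
  · have : i = k := by omega
    subst this
    rw [hx] at hxk
    cases hxk
    simp [hterm]

-- chain defined up to k
theorem chain_def (mqrf : List (String × Option String)) (g : String) (k : Nat) (xk : String)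
    (hxk : iterCh mqrf k g = some xk) :
    ∀ i, i ≤ k → ∃ x, iterCh mqrf i g = some x := by
  intro i hi
  cases hx : iterCh mqrf i g with
  | none =>
    have := iterCh_none_mono mqrf hx hi
    rw [this] at hxk
    simp at hxk
  | some x => exact ⟨x, rfl⟩

-- a terminating chain has at most len(mqrf) nodes: k + 1 ≤ len
theorem chain_card (mqrf : List (String × Option String)) (g : String) (k : Nat) (xk : String)
    (hxk : iterCh mqrf k g = some xk) (hterm : pvLook mqrf xk = some none) :
    k + 1 ≤ mqrf.length := by
  classical
  set f : Nat → String := fun i => (iterCh mqrf i g).getD "" with hf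
  have hfi : ∀ i, i ≤ k → iterCh mqrf i g = some (f i) := by
    intro i hi
    obtain ⟨x, hx⟩ := chain_def mqrf g k xk hxk i hi
    rw [hx]; simp [hf, hx]
  have hnd : ((List.range (k+1)).map f).Nodup := by
    refine List.Nodup.map_on ?_ (List.nodup_range)
    intro i hi j hj hfij
    simp only [List.mem_range] at hi hj
    rcases lt_trichotomy i j with h | h | h
    · exact absurd (hfij ▸ hfi i (by omega)) (fun hc =>
        chain_inj mqrf g k xk hxk hterm i j (f j) h (by omega) hc (hfi j (by omega)))
    · exact h
    · exact absurd (hfij ▸ hfi j (by omega)) (fun hc =>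
        chain_inj mqrf g k xk hxk hterm j i (f i) h (by omega) hc (hfi i (by omega)))
  have hsub : ∀ v ∈ (List.range (k+1)).map f, (pvLook mqrf v).isSome = true := by
    intro v hv
    obtain ⟨i, hi, rfl⟩ := List.mem_map.mp hv
    simp only [List.mem_range] at hi
    exact chain_isSome mqrf g k xk hxk hterm i (f i) (by omega) (hfi i (by omega))
  have := keys_card hnd hsub
  simpa using this

-- A's loop on a terminating chain returns (endpoint, k+1)
theorem A_run (mqrf : List (String × Option String)) (g : String) (k : Nat) (xk : String)
    (hxk : iterCh mqrf k g = some xk) (hterm : pvLook mqrf xk = some none)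
    (hcard : k + 1 ≤ mqrf.length) :
    ∀ d, ∀ i x gf fuel, i + d = k → iterCh mqrf i g = some x → pvLook mqrf x = some gf →
      d ≤ fuel → qgA_loop mqrf fuel x gf ((i : Int) + 1) = some (xk, (k : Int) + 1) := by
  intro d
  induction d with
  | zero =>
    intro i x gf fuel hik hx hgf _
    have hik' : i = k := by omega
    subst hik'
    rw [hx] at hxk
    cases hxk
    rw [hgf] at hterm
    cases hterm
    cases fuel <;> rfl
  | succ d ih =>
    intro i x gf fuel hik hx hgf hfuel
    obtain ⟨y, hy, hy'⟩ := chain_step mqrf g k xk hxk i x (by omega) hx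
    rw [hy] at hgf
    cases hgf
    obtain ⟨f, rfl⟩ : ∃ f, fuel = f + 1 := ⟨fuel - 1, by omega⟩
    obtain ⟨gf2, hgf2⟩ := Option.isSome_iff_exists.mp
      (chain_isSome mqrf g k xk hxk hterm (i+1) y (by omega) hy')
    rw [qgA_loop, hgf2]
    have hguard : ¬ ((i : Int) + 1 + 1 > (mqrf.length : Int)) := by
      have : (i : Int) + 2 ≤ (k : Int) + 1 := by
        have : i + 2 ≤ k + 1 := by omega
        exact_mod_cast this
      have hl : (k : Int) + 1 ≤ (mqrf.length : Int) := by exact_mod_cast hcard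
      omega
    simp only [if_neg hguard]
    have hcast : (i : Int) + 1 + 1 = ((i + 1 : Nat) : Int) + 1 := by push_cast; ring
    rw [hcast]
    exact ih (i+1) y gf2 f (by omega) hy' hgf2 (by omega)

-- B's phase-2 walk on a terminating chain returns (endpoint, k+1)
theorem B2_run (mqrf : List (String × Option String)) (g : String) (k : Nat) (xk : String)
    (hxk : iterCh mqrf k g = some xk) (hterm : pvLook mqrf xk = some none) :
    ∀ d, ∀ i x fuel, i + d = k → iterCh mqrf i g = some x → d < fuel →
      qgB2 mqrf fuel x ((i : Int) + 1) = some (xk, (k : Int) + 1) := by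
  intro d
  induction d with
  | zero =>
    intro i x fuel hik hx hfuel
    have hik' : i = k := by omega
    subst hik'
    rw [hx] at hxk
    cases hxk
    obtain ⟨f, rfl⟩ : ∃ f, fuel = f + 1 := ⟨fuel - 1, by omega⟩
    rw [qgB2, hterm]
  | succ d ih =>
    intro i x fuel hik hx hfuel
    obtain ⟨y, hy, hy'⟩ := chain_step mqrf g k xk hxk i x (by omega) hx
    obtain ⟨f, rfl⟩ : ∃ f, fuel = f + 1 := ⟨fuel - 1, by omega⟩
    rw [qgB2, hy]
    have hcast : (i : Int) + 1 + 1 = ((i + 1 : Nat) : Int) + 1 := by push_cast; ring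
    rw [hcast]
    exact ih (i+1) y f (by omega) hy' (by omega)

-- B's phase 1 on a terminating chain breaks into phase 2 (the pointers never meet)
theorem B1_run (mqrf : List (String × Option String)) (g : String) (k : Nat) (xk : String)
    (hxk : iterCh mqrf k g = some xk) (hterm : pvLook mqrf xk = some none) :
    ∀ fuel, ∀ t tort hare, iterCh mqrf t g = some tort → iterCh mqrf (2*t) g = some hare →
      2*t ≤ k → k + 1 ≤ 2*t + 2*fuel →
      qgB1 mqrf g fuel tort hare = qgB2 mqrf (mqrf.length + 1) g 1 := by
  intro fuel
  induction fuel with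
  | zero => intro t tort hare _ _ h1 h2; omega
  | succ f ih =>
    intro t tort hare ht hh h2tk hfuel
    rcases Nat.lt_or_ge (2*t) k with hlt | hge
    · obtain ⟨h1, hpv1, hh1⟩ := chain_step mqrf g k xk hxk (2*t) hare hlt hh
      rcases Nat.lt_or_ge (2*t+1) k with hlt1 | hge1
      · obtain ⟨h2, hpv2, hh2⟩ := chain_step mqrf g k xk hxk (2*t+1) h1 hlt1 hh1
        have htk : t < k := by omega
        obtain ⟨t1, hpvt, ht1⟩ := chain_step mqrf g k xk hxk t tort htk ht
        have hne : ¬ ((some t1 : Option String) = some h2) := by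
          intro hc
          simp only [Option.some.injEq] at hc
          subst hc
          exact chain_inj mqrf g k xk hxk hterm (t+1) (2*t+2) t1 (by omega) (by omega) ht1
            (by rw [show 2*t+2 = 2*t+1+1 from rfl]; exact hh2)
        rw [qgB1]
        simp only [hpv1, hpv2, hpvt, if_neg hne]
        exact ih (t+1) t1 h2 ht1 (by rw [show 2*(t+1) = 2*t+1+1 from by omega]; exact hh2)
          (by omega) (by omega)
      · -- 2t+1 = k: the hare's second lookup hits the terminal
        have hk1 : 2*t+1 = k := by omega
        have : h1 = xk := by
          rw [hk1] at hh1
          rw [hh1] at hxk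
          exact (Option.some.injEq _ _).mp hxk
        subst this
        rw [qgB1]
        simp only [hpv1, hterm]
    · -- 2t = k: the hare's first lookup hits the terminal
      have hk0 : 2*t = k := by omega
      have : hare = xk := by
        rw [hk0] at hh
        rw [hh] at hxk
        exact (Option.some.injEq _ _).mp hxk
      subst this
      rw [qgB1]
      simp only [hterm]

-- A's loop returns a value only if the chain reaches a terminal
theorem A_loop_some (mqrf : List (String × Option String)) (g : String) :
    ∀ fuel i x gf nb r, iterCh mqrf i g = some x → pvLook mqrf x = some gf →
      qgA_loop mqrf fuel x gf nb = some r →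
      ∃ n y, iterCh mqrf n g = some y ∧ pvLook mqrf y = some none := by
  intro fuel
  induction fuel with
  | zero =>
    intro i x gf nb r hx hgf hrun
    cases gf with
    | none => exact ⟨i, x, hx, hgf⟩
    | some g1 => simp [qgA_loop] at hrun
  | succ f ih =>
    intro i x gf nb r hx hgf hrun
    cases gf with
    | none => exact ⟨i, x, hx, hgf⟩
    | some g1 =>
      rw [qgA_loop] at hrun
      have hg1 : iterCh mqrf (i+1) g = some g1 := by
        rw [iterCh_succ_right, hx]
        simp [step1, hgf]
      cases hpv : pvLook mqrf g1 with
      | none => simp [hpv] at hrun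
      | some gf2 =>
        simp only [hpv] at hrun
        by_cases hguard : nb + 1 > (mqrf.length : Int)
        · rw [if_pos hguard] at hrun; simp at hrun
        · rw [if_neg hguard] at hrun
          exact ih (i+1) g1 gf2 (nb+1) r hg1 hpv hrun

-- B's phase 1 returns a value only if the chain reaches a terminal
theorem B1_some (mqrf : List (String × Option String)) (g : String) :
    ∀ fuel t tort hare r, iterCh mqrf (2*t) g = some hare →
      qgB1 mqrf g fuel tort hare = some r →
      ∃ n y, iterCh mqrf n g = some y ∧ pvLook mqrf y = some none := by
  intro fuel
  induction fuel with
  | zero => intro t tort hare r _ hrun; simp [qgB1] at hrun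
  | succ f ih =>
    intro t tort hare r hh hrun
    rw [qgB1] at hrun
    cases hpv1 : pvLook mqrf hare with
    | none => simp [hpv1] at hrun
    | some o1 =>
      cases o1 with
      | none => exact ⟨2*t, hare, hh, hpv1⟩
      | some h1 =>
        simp only [hpv1] at hrun
        have hh1 : iterCh mqrf (2*t+1) g = some h1 := by
          rw [iterCh_succ_right, hh]
          simp [step1, hpv1]
        cases hpv2 : pvLook mqrf h1 with
        | none => simp [hpv2] at hrun
        | some o2 =>
          cases o2 with
          | none => exact ⟨2*t+1, h1, hh1, hpv2⟩
          | some h2 =>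
            simp only [hpv2] at hrun
            have hh2 : iterCh mqrf (2*(t+1)) g = some h2 := by
              rw [show 2*(t+1) = (2*t+1)+1 from by omega, iterCh_succ_right, hh1]
              simp [step1, hpv2]
            cases hpvt : pvLook mqrf tort with
            | none => simp [hpvt] at hrun
            | some tv =>
              simp only [hpvt] at hrun
              by_cases heq : tv = some h2
              · rw [if_pos heq] at hrun; simp at hrun
              · rw [if_neg heq] at hrun
                cases tv with
                | none => simp at hrun
                | some t1 => exact ih (t+1) t1 h2 r hh2 hrun

-- ===== VERDICT (by name: the statement is the Claim_ definition above) =====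
theorem quel_guichet_v3_spec : Claim_equal_quel_guichet_v3 := by
  intro mqrf g _ _
  unfold Spec_quel_guichet_v3
  by_cases hT : ∃ n y, iterCh mqrf n g = some y ∧ pvLook mqrf y = some none
  · -- terminating chain: both sides return (endpoint, k+1)
    obtain ⟨k, xk, hxk, hterm⟩ := hT
    have hcard := chain_card mqrf g k xk hxk hterm
    have h0 : iterCh mqrf 0 g = some g := rfl
    obtain ⟨gf0, hgf0⟩ := Option.isSome_iff_exists.mp
      (chain_isSome mqrf g k xk hxk hterm 0 g (Nat.zero_le k) h0)
    have hA : quel_guichet_v3 mqrf g = some (xk, (k : Int) + 1) := by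
      unfold quel_guichet_v3
      rw [hgf0]
      have := A_run mqrf g k xk hxk hterm hcard k 0 g gf0 mqrf.length (by omega) h0 hgf0 (by omega)
      simpa using this
    have hB : quel_guichet_v3_alt mqrf g = some (xk, (k : Int) + 1) := by
      unfold quel_guichet_v3_alt
      rw [B1_run mqrf g k xk hxk hterm (mqrf.length + 1) 0 g g h0 h0 (by omega) (by omega)]
      have := B2_run mqrf g k xk hxk hterm k 0 g (mqrf.length + 1) (by omega) h0 (by omega)
      simpa using this
    rw [hA, hB]
  · -- no terminal: both sides return none
    have hA : quel_guichet_v3 mqrf g = none := by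
      unfold quel_guichet_v3
      cases hgf : pvLook mqrf g with
      | none => rfl
      | some gf =>
        cases hrun : qgA_loop mqrf mqrf.length g gf 1 with
        | none => simp [hrun]
        | some r => exact absurd (A_loop_some mqrf g mqrf.length 0 g gf 1 r rfl hgf hrun) hT
    have hB : quel_guichet_v3_alt mqrf g = none := by
      unfold quel_guichet_v3_alt
      cases hrun : qgB1 mqrf g (mqrf.length + 1) g g with
      | none => rfl
      | some r => exact absurd (B1_some mqrf g (mqrf.length + 1) 0 g g r rfl hrun) hT
    rw [hA, hB]
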